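-- pv_equiv track=rewrite | github.com/mariowanka/advent_of_code_2019 | 4/silver_star.py | _fits
-- ===== SOURCE A (Python) =====
-- RANGE_FROM = 145852
--
-- RANGE_TO = 616942
--
-- def _fits(num):
--     'Decide whether number meets friteria or not.'
--     if num < RANGE_FROM or num > RANGE_TO:
--         return False
--     num = str(num)
--     adj = False
--     for i in range(1, len(num)):
--         if num[i] < num[i-1]:
--             return False
--         if num[i] == num[i-1]:
--             adj = True
--     return adj
-- ===== SOURCE B (Python) =====
-- RANGE_FROM = 145852
--
-- RANGE_TO = 616942
--
-- def _fits(num):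
--     'Decide whether number meets friteria or not.'
--     if num < RANGE_FROM or num > RANGE_TO:
--         return False
--     s = str(num)
--     return s == ''.join(sorted(s)) and len(set(s)) < len(s)
-- ===== Notes on version B (the rewrite author's own statement) =====
-- stated objective: simpler
-- what changed: Replaced the index loop scanning adjacent digit pairs with a whole-string formulation: non-decreasing via sort-and-compare (s == ''.join(sorted(s))) and a repeated digit via len(set(s)) < len(s), which under monotonicity equals the adjacent-pair condition.
import Mathlib
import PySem

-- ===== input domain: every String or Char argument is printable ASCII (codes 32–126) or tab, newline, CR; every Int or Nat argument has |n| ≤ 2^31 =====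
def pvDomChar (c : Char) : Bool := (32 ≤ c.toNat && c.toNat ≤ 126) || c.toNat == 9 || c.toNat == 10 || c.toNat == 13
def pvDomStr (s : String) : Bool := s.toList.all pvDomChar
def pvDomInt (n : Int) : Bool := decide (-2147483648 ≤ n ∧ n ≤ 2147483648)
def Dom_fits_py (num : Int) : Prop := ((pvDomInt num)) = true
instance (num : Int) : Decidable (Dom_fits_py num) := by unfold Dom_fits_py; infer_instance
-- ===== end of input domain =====

-- B replaces A's adjacent-pair index loop with a sort-and-compare plus set-size test (objective: simpler).

-- ===== PORT A =====
-- the 'for i in range(1, len(num))' loop, as recursion over the tail with the previous char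
def fitsLoop : List Char → Char → Bool → Bool
  | [], _, adj => adj
  | c :: rest, prev, adj =>
    if c < prev then false
    else fitsLoop rest c (if c == prev then true else adj)

def fits_py (num : Int) : Bool :=
  if num < 145852 ∨ num > 616942 then false
  else
    match PySem.Int.toChars num with
    | [] => false          -- empty string: the loop body never runs, adj stays False
    | h :: t => fitsLoop t h false

-- ===== PORT B =====
def fits_py_alt (num : Int) : Bool :=
  if num < 145852 ∨ num > 616942 then false
  else
    let s := PySem.Int.toChars num
    (s == PySem.List.sorted s (fun c => c) false) &&
      decide ((PySem.Set.ofList s).length < s.length)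

-- ===== PRECONDITION & SPEC =====
def Spec_fits_py (num : Int) (out : Bool) : Prop := out = fits_py_alt num
instance (num : Int) (out : Bool) : Decidable (Spec_fits_py num out) := by unfold Spec_fits_py; infer_instance

-- ===== CLAIM (what is proved, stated in full; the proofs are below) =====
def Claim_equal_fits_py : Prop := ∀ (num : Int), Dom_fits_py num → Spec_fits_py num (fits_py num)

-- ===== LEMMAS AND PROOFS =====

-- Boolean "non-decreasing adjacent pairs" and "some adjacent pair equal"
def chainB : List Char → Bool
  | [] => true
  | [_] => true
  | a :: b :: t => decide (a ≤ b) && chainB (b :: t)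

def adjB : List Char → Bool
  | [] => false
  | [_] => false
  | a :: b :: t => (a == b) || adjB (b :: t)

theorem fitsLoop_eq (t : List Char) : ∀ (prev : Char) (adj : Bool),
    fitsLoop t prev adj = (chainB (prev :: t) && (adj || adjB (prev :: t))) := by
  induction t with
  | nil => intro prev adj; simp [fitsLoop, chainB, adjB]
  | cons c rest ih =>
    intro prev adj
    by_cases h : c < prev
    · simp [fitsLoop, chainB, h, not_le.mpr h]
    · have hle : prev ≤ c := not_lt.mp h
      simp only [fitsLoop, if_neg h, ih, chainB, adjB, decide_eq_true hle, Bool.true_and]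
      by_cases he : c = prev
      · subst he; simp
      · have : (c == prev) = false := beq_eq_false_iff_ne.mpr he
        have h2 : (prev == c) = false := beq_eq_false_iff_ne.mpr (Ne.symm he)
        simp [this, h2]

theorem chainB_iff_pairwise (l : List Char) :
    chainB l = true ↔ l.Pairwise (· ≤ ·) := by
  induction l with
  | nil => simp [chainB]
  | cons a l ih =>
    cases l with
    | nil => simp [chainB]
    | cons b t =>
      simp only [chainB, Bool.and_eq_true, decide_eq_true_eq, ih, List.pairwise_cons]
      constructor
      · rintro ⟨hab, hb, hp⟩
        refine ⟨fun x hx => ?_, hb, hp⟩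
        rcases List.mem_cons.mp hx with rfl | hx
        · exact hab
        · exact le_trans hab (hb x hx)
      · rintro ⟨ha, hb, hp⟩
        exact ⟨ha b (List.mem_cons_self ..), hb, hp⟩

theorem sorted_eq_iff_chainB (l : List Char) :
    (l == PySem.List.sorted l (fun c => c) false) = chainB l := by
  by_cases h : chainB l = true
  · have := PySem.List.sorted_eq_self_of_pairwise (key := fun c : Char => c) (xs := l)
      (by simpa using (chainB_iff_pairwise l).mp h)
    simp [this, h]
  · have hb : chainB l = false := by simpa using h
    rw [hb, beq_eq_false_iff_ne]
    intro he
    apply h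
    rw [chainB_iff_pairwise]
    have := PySem.List.sorted_pairwise (xs := l) (key := fun c : Char => c)
    rw [← he] at this
    simpa using this

-- under monotonicity, an adjacent equal pair is exactly a duplicate
theorem adjB_iff_not_nodup (l : List Char) (h : l.Pairwise (· ≤ ·)) :
    adjB l = true ↔ ¬ l.Nodup := by
  induction l with
  | nil => simp [adjB, List.nodup_nil]
  | cons a l ih =>
    cases l with
    | nil => simp [adjB]
    | cons b t =>
      have hp : (b :: t).Pairwise (· ≤ ·) := (List.pairwise_cons.mp h).2
      have hab : a ≤ b := (List.pairwise_cons.mp h).1 b (List.mem_cons_self ..)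
      simp only [adjB, Bool.or_eq_true, beq_iff_eq, ih hp, List.nodup_cons]
      constructor
      · rintro (rfl | hd)
        · simp
        · tauto
      · intro hn
        by_cases hab' : a = b
        · exact Or.inl hab'
        · right
          intro hnd
          apply hn
          refine ⟨?_, hnd⟩
          intro hmem
          rcases List.mem_cons.mp hmem with rfl | hmem
          · exact hab' rfl
          · -- a ∈ t with a ≤ b and b ≤ a (from pairwise) forces a = b
            have hba : b ≤ a := (List.pairwise_cons.mp hp).1 a hmem
            exact hab' (le_antisymm hab hba)

theorem setlen_lt_iff_not_nodup (l : List Char) :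
    (PySem.Set.ofList l).length < l.length ↔ ¬ l.Nodup := by
  constructor
  · intro hlt hnd
    have hsub : l ⊆ PySem.Set.ofList l := fun x hx => (PySem.Set.mem_ofList l x).mpr hx
    have := (List.subperm_of_subset hnd hsub).length_le
    omega
  · intro hnd
    have hsub : (PySem.Set.ofList l : List Char) ⊆ l :=
      fun x hx => (PySem.Set.mem_ofList l x).mp hx
    have hsp := List.subperm_of_subset (PySem.Set.nodup_ofList l) hsub
    have hle := hsp.length_le
    rcases lt_or_eq_of_le hle with h | h
    · exact h
    · exfalso
      exact hnd (((hsp.perm_of_length_le (le_of_eq h.symm)).nodup_iff).mp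
        (PySem.Set.nodup_ofList l))

-- ===== VERDICT (by name: the statement is the Claim_ definition above) =====
theorem fits_py_spec : Claim_equal_fits_py := by
  intro num _
  unfold Spec_fits_py fits_py fits_py_alt
  by_cases hg : num < 145852 ∨ num > 616942
  · simp [hg]
  · simp only [if_neg hg]
    cases hs : PySem.Int.toChars num with
    | nil => simp [PySem.Set.ofList, PySem.List.sorted]
    | cons h t =>
      show fitsLoop t h false = _
      rw [fitsLoop_eq, sorted_eq_iff_chainB]
      by_cases hc : chainB (h :: t) = true
      · have hp := (chainB_iff_pairwise _).mp hc
        have := adjB_iff_not_nodup (h :: t) hp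
        rw [← setlen_lt_iff_not_nodup] at this
        simp only [hc, Bool.true_and, Bool.false_or]
        rcases Bool.eq_false_or_eq_true (adjB (h :: t)) with ha | ha <;>
          simp_all
      · have hb : chainB (h :: t) = false := by simpa using hc
        simp [hb]
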